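-- pv_equiv track=rewrite | github.com/rasimishere/OddMatrixGenerator | main.py | create_odd_value_array
-- ===== SOURCE A (Python) =====
-- def create_odd_value_array(rows, columns):
--     array = []
--     odd_value = 1
--     for r in range(rows):
--         row = []
--         for c in range(columns):
--             row.append(odd_value)
--             odd_value += 2
--         array.append(row)
--     return array
-- ===== SOURCE B (Python) =====
-- def create_odd_value_array(rows, columns):
--     return [[2 * (r * columns + c) + 1 for c in range(columns)] for r in range(rows)]
-- ===== Notes on version B (the rewrite author's own statement) =====
-- stated objective: simpler
-- what changed: Replaced the running odd_value accumulator with a closed-form index formula 2*(r*columns+c)+1, building the matrix as a stateless nested comprehension.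
import Mathlib
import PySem

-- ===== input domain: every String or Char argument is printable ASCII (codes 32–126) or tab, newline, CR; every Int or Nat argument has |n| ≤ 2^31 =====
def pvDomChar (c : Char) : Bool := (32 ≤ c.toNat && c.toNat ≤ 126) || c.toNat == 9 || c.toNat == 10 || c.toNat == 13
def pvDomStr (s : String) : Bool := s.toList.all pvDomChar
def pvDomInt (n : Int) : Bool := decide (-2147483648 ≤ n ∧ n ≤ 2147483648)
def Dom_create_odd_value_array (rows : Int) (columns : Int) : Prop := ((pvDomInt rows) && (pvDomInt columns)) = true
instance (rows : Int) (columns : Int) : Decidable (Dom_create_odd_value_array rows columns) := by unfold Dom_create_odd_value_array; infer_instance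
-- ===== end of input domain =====

-- B replaces A's running odd_value accumulator by the closed-form index formula 2*(r*columns+c)+1 (objective: simpler).

-- ===== PORT A =====
-- literal transliteration: nested for-loops threading (array, odd_value) / (row, odd_value)
def create_odd_value_array (rows : Int) (columns : Int) : List (List Int) :=
  ((PySem.List.pyRange 0 rows 1).foldl
    (fun (st : List (List Int) × Int) (_r : Int) =>
      (st.1 ++ [((PySem.List.pyRange 0 columns 1).foldl
          (fun (p : List Int × Int) (_c : Int) => (p.1 ++ [p.2], p.2 + 2)) ([], st.2)).1],
       ((PySem.List.pyRange 0 columns 1).foldl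
          (fun (p : List Int × Int) (_c : Int) => (p.1 ++ [p.2], p.2 + 2)) ([], st.2)).2))
    ([], 1)).1

-- ===== PORT B =====
-- literal transliteration of the nested comprehension with the index formula
def create_odd_value_array_alt (rows : Int) (columns : Int) : List (List Int) :=
  (PySem.List.pyRange 0 rows 1).map (fun r =>
    (PySem.List.pyRange 0 columns 1).map (fun c => 2 * (r * columns + c) + 1))

-- ===== PRECONDITION & SPEC =====
def Spec_create_odd_value_array (rows : Int) (columns : Int) (out : List (List Int)) : Prop := out = create_odd_value_array_alt rows columns
instance (rows : Int) (columns : Int) (out : List (List Int)) : Decidable (Spec_create_odd_value_array rows columns out) := by unfold Spec_create_odd_value_array; infer_instance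

-- ===== CLAIM (what is proved, stated in full; the proofs are below) =====
def Claim_equal_create_odd_value_array : Prop := ∀ (rows : Int) (columns : Int), Dom_create_odd_value_array rows columns → Spec_create_odd_value_array rows columns (create_odd_value_array rows columns)

-- ===== LEMMAS AND PROOFS =====

-- the inner loop: appends n consecutive odds starting at v, leaves v + 2n
theorem pv_inner_foldl (l : List Int) : ∀ (acc : List Int) (v : Int),
    l.foldl (fun (p : List Int × Int) (_c : Int) => (p.1 ++ [p.2], p.2 + 2)) (acc, v)
      = (acc ++ (List.range l.length).map (fun c : Nat => v + 2 * (c : Int)),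
         v + 2 * (l.length : Int)) := by
  induction l with
  | nil => intro acc v; simp
  | cons x xs ih =>
      intro acc v
      simp only [List.foldl_cons, ih, List.length_cons, Prod.mk.injEq]
      refine ⟨?_, by push_cast; ring⟩
      simp only [List.range_succ_eq_map, List.map_cons, List.map_map, List.append_assoc,
        List.singleton_append]
      congr 1
      congr 1
      · push_cast; ring
      · apply List.map_congr_left; intro c _; simp only [Function.comp_def]; push_cast; ring

-- the outer loop, with the inner range fixed as a list 'cols' of length m
theorem pv_outer_foldl (cols : List Int) (l : List Int) : ∀ (acc : List (List Int)) (v : Int),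
    l.foldl
      (fun (st : List (List Int) × Int) (_r : Int) =>
        (st.1 ++ [(cols.foldl
            (fun (p : List Int × Int) (_c : Int) => (p.1 ++ [p.2], p.2 + 2)) ([], st.2)).1],
         (cols.foldl
            (fun (p : List Int × Int) (_c : Int) => (p.1 ++ [p.2], p.2 + 2)) ([], st.2)).2))
      (acc, v)
      = (acc ++ (List.range l.length).map (fun r : Nat =>
            (List.range cols.length).map (fun c : Nat =>
              v + 2 * ((r : Int) * (cols.length : Int) + (c : Int)))),
         v + 2 * ((l.length : Int) * (cols.length : Int))) := by
  induction l with
  | nil => intro acc v; simp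
  | cons x xs ih =>
      intro acc v
      simp only [List.foldl_cons, List.length_cons]
      rw [pv_inner_foldl, ih]
      simp only [Prod.mk.injEq]
      refine ⟨?_, by push_cast; ring⟩
      simp only [List.nil_append, List.range_succ_eq_map, List.map_cons, List.map_map,
        List.append_assoc, List.singleton_append]
      congr 1
      congr 1
      · apply List.map_congr_left; intro c _; push_cast; ring
      · apply List.map_congr_left; intro r _
        simp only [Function.comp_def]
        apply List.map_congr_left; intro c _
        push_cast; ring

theorem create_odd_value_array_spec : Claim_equal_create_odd_value_array := by
  unfold Claim_equal_create_odd_value_array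
  intro rows columns _
  unfold Spec_create_odd_value_array create_odd_value_array create_odd_value_array_alt
  rw [pv_outer_foldl]
  simp only [List.nil_append, PySem.List.pyRange_one, List.map_map, List.length_map,
    List.length_range, zero_add, sub_zero]
  apply List.map_congr_left
  intro r _
  simp only [Function.comp_def]
  apply List.map_congr_left
  intro c hc
  rcases le_or_gt 0 columns with h | h
  · have hcol : ((columns.toNat : Int)) = columns := by omega
    rw [hcol]; ring
  · exfalso
    have : columns.toNat = 0 := by omega
    simp [this] at hc
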